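-- pv_equiv track=rewrite | github.com/qingfeng/pycoin | pycoin/contrib/cash_addr.py | cash_polymod
-- ===== SOURCE A (Python) =====
-- def cash_polymod(values):
--     """Internal function that computes the Cash checksum."""
--     generator = [
--         0x98f2bc8e61,
--         0x79b76d99e2,
--         0xf33e5fb3c4,
--         0xae2eabe2a8,
--         0x1e4f43e470
--         ]
--     chk = 1
--     for value in values:
--         top = chk >> 35
--         #chk = (chk & 0x1ffffff) << 5 ^ value
--         chk = ((chk & 0x07ffffffff) << 5) ^ value
--         for i in range(5):
--             chk ^= generator[i] if ((top >> i) & 1) else 0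
--     return chk ^ 1
-- ===== SOURCE B (Python) =====
-- def cash_polymod(values):
--     """Internal function that computes the Cash checksum."""
--     generator = [
--         0x98f2bc8e61,
--         0x79b76d99e2,
--         0xf33e5fb3c4,
--         0xae2eabe2a8,
--         0x1e4f43e470
--         ]
--     # precompute: mask[t] = XOR of generator[i] over the bits i (0..4) set in t
--     mask = []
--     for t in range(32):
--         m = 0
--         for i in range(5):
--             if (t >> i) & 1:
--                 m ^= generator[i]
--         mask.append(m)
--     chk = 1
--     for value in values:
--         chk = (((chk & 0x07ffffffff) << 5) ^ value) ^ mask[(chk >> 35) & 0x1f]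
--     return chk ^ 1
-- ===== Notes on version B (the rewrite author's own statement) =====
-- stated objective: faster
-- what changed: Precomputes a 32-entry table mask[t] = XOR of the generators selected by the bits of t, so the main loop does a single table lookup mask[(chk>>35)&0x1f] instead of the inner 5-iteration conditional-XOR loop.
import Mathlib
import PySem

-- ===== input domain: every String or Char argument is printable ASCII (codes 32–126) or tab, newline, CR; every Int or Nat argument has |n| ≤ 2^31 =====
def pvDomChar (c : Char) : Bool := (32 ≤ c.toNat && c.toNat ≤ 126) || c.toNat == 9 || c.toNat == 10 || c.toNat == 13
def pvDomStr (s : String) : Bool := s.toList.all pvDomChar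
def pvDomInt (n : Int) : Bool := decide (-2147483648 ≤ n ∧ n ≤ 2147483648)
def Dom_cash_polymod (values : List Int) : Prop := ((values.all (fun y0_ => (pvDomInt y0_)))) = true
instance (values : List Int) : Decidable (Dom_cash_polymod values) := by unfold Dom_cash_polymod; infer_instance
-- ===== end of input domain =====

-- B precomputes a 32-entry XOR table so the main loop replaces the inner 5-step
-- conditional-XOR loop by one table lookup (objective: faster, constant factor).


-- ===== PORT A =====
def cash_polymod (values : List Int) : Int :=
  let generator : List Int :=
    [0x98f2bc8e61, 0x79b76d99e2, 0xf33e5fb3c4, 0xae2eabe2a8, 0x1e4f43e470]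
  let chk : Int := values.foldl (fun chk value =>
    let top := chk >>> 35
    let chk := PySem.Int.bxor ((PySem.Int.band chk 0x07ffffffff) <<< 5) value
    -- for i in range(5): chk ^= generator[i] if ((top >> i) & 1) else 0
    (PySem.List.pyRange 0 5 1).foldl (fun chk i =>
      PySem.Int.bxor chk
        (if PySem.Int.band (top >>> i.toNat) 1 ≠ 0
         then (PySem.List.pyGet? generator i).getD 0 else 0)) chk) 1
  PySem.Int.bxor chk 1

-- ===== PORT B =====
-- mask entry for t: XOR of generator[i] over the bits i set in t (Source B's inner build loop)
def pvMaskEntry (generator : List Int) (t : Int) : Int :=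
  (PySem.List.pyRange 0 5 1).foldl (fun m i =>
    if PySem.Int.band (t >>> i.toNat) 1 ≠ 0
    then PySem.Int.bxor m ((PySem.List.pyGet? generator i).getD 0) else m) 0

def cash_polymod_alt (values : List Int) : Int :=
  let generator : List Int :=
    [0x98f2bc8e61, 0x79b76d99e2, 0xf33e5fb3c4, 0xae2eabe2a8, 0x1e4f43e470]
  let mask : List Int :=
    (PySem.List.pyRange 0 32 1).foldl (fun acc t => acc ++ [pvMaskEntry generator t]) []
  let chk : Int := values.foldl (fun chk value =>
    PySem.Int.bxor
      (PySem.Int.bxor ((PySem.Int.band chk 0x07ffffffff) <<< 5) value)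
      ((PySem.List.pyGet? mask (PySem.Int.band (chk >>> 35) 0x1f)).getD 0)) 1
  PySem.Int.bxor chk 1

-- ===== PRECONDITION & SPEC =====
def Spec_cash_polymod (values : List Int) (out : Int) : Prop := out = cash_polymod_alt values
instance (values : List Int) (out : Int) : Decidable (Spec_cash_polymod values out) := by unfold Spec_cash_polymod; infer_instance

-- ===== CLAIM (what is proved, stated in full; the proofs are below) =====
def Claim_equal_cash_polymod : Prop := ∀ (values : List Int), Dom_cash_polymod values → Spec_cash_polymod values (cash_polymod values)

-- ===== LEMMAS AND PROOFS =====

theorem pv_bxor_eq_xor (a b : Int) : PySem.Int.bxor a b = Int.xor a b := by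
  cases a <;> cases b <;> simp [PySem.Int.bxor, Int.xor] <;> omega

theorem pv_xor_assoc (a b c : Int) : Int.xor (Int.xor a b) c = Int.xor a (Int.xor b c) := by
  cases a <;> cases b <;> cases c <;> simp [Int.xor, Nat.xor_assoc]

theorem pv_bxor_assoc (a b c : Int) :
    PySem.Int.bxor (PySem.Int.bxor a b) c = PySem.Int.bxor a (PySem.Int.bxor b c) := by
  simp [pv_bxor_eq_xor, pv_xor_assoc]

theorem pv_and31_mod (m : Nat) : m &&& 31 = m % 32 := by
  have := Nat.and_two_pow_sub_one_eq_mod m 5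
  norm_num at this; omega

theorem pv_one_and (x : Nat) : 1 &&& x = x % 2 := by
  rw [Nat.land_comm]; exact Nat.and_one_is_mod x

-- a >>> (coerced Nat) is the Nat-exponent shift
theorem pv_srw (a : Int) (n : Nat) : a >>> (n : Int) = a >>> n := by
  cases a <;> cases n <;> rfl

-- the four computation rules of Python's & against the masks 31 and 1
theorem pv_band_ofNat (m b : Nat) : PySem.Int.band (Int.ofNat m) (Int.ofNat b) = Int.ofNat (m &&& b) := by
  unfold PySem.Int.band
  rw [if_pos (show (0:Int) ≤ Int.ofNat m from Int.natCast_nonneg m), if_pos (show (0:Int) ≤ Int.ofNat b from Int.natCast_nonneg b)]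
  rfl

theorem pv_band_negSucc (m b : Nat) : PySem.Int.band (Int.negSucc m) (Int.ofNat b) = Int.ofNat (b - (b &&& m)) := by
  unfold PySem.Int.band
  rw [if_neg (by omega), if_pos (show (0:Int) ≤ Int.ofNat b from Int.natCast_nonneg b)]
  have h : (-(Int.negSucc m) - 1).toNat = m := by omega
  rw [h]
  rfl

-- bit i (i < 5) of (a & 31) equals bit i of a, for any Python integer a
theorem pv_bit_of_and31 (a : Int) (i : Nat) (hi : i < 5) :
    PySem.Int.band ((PySem.Int.band a 31) >>> i) 1 = PySem.Int.band (a >>> i) 1 := by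
  have h31 : (31 : Int) = Int.ofNat 31 := rfl
  have h1i : (1 : Int) = Int.ofNat 1 := rfl
  rw [h31, h1i]
  cases a with
  | ofNat m =>
      rw [pv_band_ofNat m 31]
      have h2 : ∀ k : Nat, (Int.ofNat k) >>> i = Int.ofNat (k >>> i) := fun _ => rfl
      rw [h2, h2, pv_band_ofNat _ 1, pv_band_ofNat _ 1]
      congr 1
      simp only [Nat.and_one_is_mod, Nat.shiftRight_eq_div_pow, pv_and31_mod]
      interval_cases i <;> norm_num <;> omega
  | negSucc m =>
      rw [pv_band_negSucc m 31]
      have h2 : (Int.ofNat (31 - (31 &&& m))) >>> i = Int.ofNat ((31 - (31 &&& m)) >>> i) := rfl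
      have h2' : (Int.negSucc m) >>> i = Int.negSucc (m >>> i) := rfl
      rw [h2, h2', pv_band_ofNat _ 1, pv_band_negSucc _ 1]
      congr 1
      have h5 : 31 &&& m = m % 32 := by rw [Nat.land_comm]; exact pv_and31_mod m
      simp only [Nat.and_one_is_mod, pv_one_and, Nat.shiftRight_eq_div_pow, h5]
      interval_cases i <;> norm_num <;> omega

-- a & 31 is a natural number below 32
theorem pv_and31_range (a : Int) : ∃ n : Nat, PySem.Int.band a 31 = Int.ofNat n ∧ n < 32 := by
  have h31 : (31 : Int) = Int.ofNat 31 := rfl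
  rw [h31]
  cases a with
  | ofNat m =>
      refine ⟨m &&& 31, pv_band_ofNat m 31, ?_⟩
      rw [pv_and31_mod]; omega
  | negSucc m =>
      exact ⟨31 - (31 &&& m), pv_band_negSucc m 31, by omega⟩

-- pulling the accumulator out of a 5-long xor chain
theorem pv_chain (c x0 x1 x2 x3 x4 : Int) :
    PySem.Int.bxor (PySem.Int.bxor (PySem.Int.bxor (PySem.Int.bxor (PySem.Int.bxor c x0) x1) x2) x3) x4
      = PySem.Int.bxor c (PySem.Int.bxor x0 (PySem.Int.bxor x1 (PySem.Int.bxor x2 (PySem.Int.bxor x3 x4)))) := by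
  simp [pv_bxor_assoc]

theorem pv_foldl_ext {a b : Type} (f g : a -> b -> a) (h : forall x y, f x y = g x y)
    (l : List b) (x : a) : l.foldl f x = l.foldl g x := by
  have hfg : f = g := funext fun x => funext fun y => h x y
  rw [hfg]

theorem pv_step_eq (chk value : Int) :
    ((PySem.List.pyRange 0 5 1).foldl (fun c i =>
       PySem.Int.bxor c
         (if PySem.Int.band ((chk >>> 35) >>> (i.toNat : Int)) 1 ≠ 0
          then (PySem.List.pyGet? [(0x98f2bc8e61 : Int), 0x79b76d99e2, 0xf33e5fb3c4, 0xae2eabe2a8, 0x1e4f43e470] i).getD 0 else 0))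
      (PySem.Int.bxor ((PySem.Int.band chk 0x07ffffffff) <<< 5) value))
    = PySem.Int.bxor
        (PySem.Int.bxor ((PySem.Int.band chk 0x07ffffffff) <<< 5) value)
        ((PySem.List.pyGet?
            ((PySem.List.pyRange 0 32 1).foldl (fun acc t => acc ++ [pvMaskEntry [(0x98f2bc8e61 : Int), 0x79b76d99e2, 0xf33e5fb3c4, 0xae2eabe2a8, 0x1e4f43e470] t]) [])
            (PySem.Int.band (chk >>> 35) 0x1f)).getD 0) := by
  have hr : PySem.List.pyRange 0 5 1 = [0, 1, 2, 3, 4] := by decide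
  simp only [hr, List.foldl]
  rw [pv_srw, pv_srw, pv_srw, pv_srw, pv_srw]
  simp only [show ((0:Int).toNat) = (0:Nat) from rfl, show ((1:Int).toNat) = (1:Nat) from rfl,
    show ((2:Int).toNat) = (2:Nat) from rfl, show ((3:Int).toNat) = (3:Nat) from rfl,
    show ((4:Int).toNat) = (4:Nat) from rfl]
  rw [pv_chain]
  congr 1
  rw [← pv_bit_of_and31 (chk >>> 35) 0 (by norm_num),
      ← pv_bit_of_and31 (chk >>> 35) 1 (by norm_num),
      ← pv_bit_of_and31 (chk >>> 35) 2 (by norm_num),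
      ← pv_bit_of_and31 (chk >>> 35) 3 (by norm_num),
      ← pv_bit_of_and31 (chk >>> 35) 4 (by norm_num)]
  obtain ⟨n, hn, hlt⟩ := pv_and31_range (chk >>> 35)
  rw [show (0x1f : Int) = 31 from rfl] at *
  rw [hn]
  interval_cases n <;> decide

-- ===== VERDICT (by name: the statement is the Claim_ definition above) =====
theorem cash_polymod_spec : Claim_equal_cash_polymod := by
  intro values _
  unfold Spec_cash_polymod cash_polymod cash_polymod_alt
  simp only []
  congr 1
  exact pv_foldl_ext _ _ (fun c v => pv_step_eq c v) values 1
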